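-- pv_equiv track=rewrite | github.com/vpc-ccg/freddie | py/mean_shift.py | get_segments
-- ===== SOURCE A (Python) =====
-- def get_segments(coverage_l=0, ticks=set()):
--     segs = list()
--     segs.append((
--         0,
--         coverage_l,
--     ))
--     for i in range(coverage_l):
--         if i in ticks:
--             segs[-1] = (
--                 segs[-1][0],
--                 i,
--             )
--             segs.append((
--                 i,
--                 coverage_l,
--             ))
--     return segs
-- ===== SOURCE B (Python) =====
-- def get_segments(coverage_l=0, ticks=set()):
--     # Build each segment directly between consecutive sorted in-range tick boundaries.
--     bounds = sorted(t for t in set(ticks) if 0 <= t < coverage_l)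
--     segs = []
--     prev = 0
--     for t in bounds:
--         segs.append((prev, t))
--         prev = t
--     segs.append((prev, coverage_l))
--     return segs
-- ===== Notes on version B (the rewrite author's own statement) =====
-- stated objective: alternative
-- what changed: Instead of scanning every position in range(coverage_l) and patching the last segment whenever a tick is hit, B sorts the in-range ticks once and emits each segment directly between consecutive boundaries.
import Mathlib
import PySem

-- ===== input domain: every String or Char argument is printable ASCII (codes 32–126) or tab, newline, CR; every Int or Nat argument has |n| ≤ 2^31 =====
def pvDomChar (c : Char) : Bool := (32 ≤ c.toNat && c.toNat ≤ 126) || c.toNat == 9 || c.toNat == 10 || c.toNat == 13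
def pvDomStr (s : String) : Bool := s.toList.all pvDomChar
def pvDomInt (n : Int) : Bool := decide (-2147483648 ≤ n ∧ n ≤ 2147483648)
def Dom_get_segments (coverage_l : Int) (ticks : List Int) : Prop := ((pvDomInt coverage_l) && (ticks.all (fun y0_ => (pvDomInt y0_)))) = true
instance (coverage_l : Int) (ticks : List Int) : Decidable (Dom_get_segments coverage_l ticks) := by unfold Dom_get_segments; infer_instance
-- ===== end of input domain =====

-- B replaces A's scan over every position of range(coverage_l) (patching the last segment at
-- each tick) by a direct build from the sorted in-range ticks (objective: alternative algorithm).

-- ===== PORT A =====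
-- literal port of A: segs starts as [(0, coverage_l)]; for each i of range(coverage_l),
-- if i in ticks, patch segs[-1]'s end to i and append (i, coverage_l).  Tuples are 2-lists.
def get_segments (coverage_l : Int) (ticks : List Int) : List (List Int) :=
  (PySem.List.pyRange 0 coverage_l 1).foldl
    (fun segs i =>
      if ticks.contains i then
        segs.dropLast ++ [[((segs.getLast?.getD []).headD 0), i], [i, coverage_l]]
      else segs)
    [[0, coverage_l]]

-- ===== PORT B =====
-- B helper: the loop `for t in bounds: segs.append((prev, t)); prev = t` plus the final append
def mkSegs (prev : Int) (coverage_l : Int) : List Int → List (List Int)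
  | [] => [[prev, coverage_l]]
  | t :: ts => [prev, t] :: mkSegs t coverage_l ts

def get_segments_alt (coverage_l : Int) (ticks : List Int) : List (List Int) :=
  mkSegs 0 coverage_l
    (PySem.List.sorted
      ((PySem.Set.ofList ticks).filter (fun t => decide (0 ≤ t) && decide (t < coverage_l)))
      (fun x => x) false)

-- ===== PRECONDITION & SPEC =====
def Spec_get_segments (coverage_l : Int) (ticks : List Int) (out : List (List Int)) : Prop := out = get_segments_alt coverage_l ticks
instance (coverage_l : Int) (ticks : List Int) (out : List (List Int)) : Decidable (Spec_get_segments coverage_l ticks out) := by unfold Spec_get_segments; infer_instance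

-- ===== CLAIM (what is proved, stated in full; the proofs are below) =====
def Claim_equal_get_segments : Prop := ∀ (coverage_l : Int) (ticks : List Int), Dom_get_segments coverage_l ticks → Spec_get_segments coverage_l ticks (get_segments coverage_l ticks)

-- ===== LEMMAS AND PROOFS =====

-- the ticks of [0, n) in increasing order, as A's loop meets them
def upT (ticks : List Int) (n : Nat) : List Int :=
  ((List.range n).map (fun (k : Nat) => (k : Int))).filter (fun t => ticks.contains t)

theorem upT_succ (ticks : List Int) (n : Nat) :
    upT ticks (n + 1) =
      upT ticks n ++ (if ticks.contains ((n : Nat) : Int) then [((n : Nat) : Int)] else []) := by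
  simp [upT, List.range_succ, List.filter_append]
  split <;> simp_all

theorem mkSegs_getLast? (p L : Int) (ts : List Int) :
    (mkSegs p L ts).getLast? = some [ts.getLastD p, L] := by
  induction ts generalizing p with
  | nil => simp [mkSegs]
  | cons t ts ih =>
      cases ts with
      | nil => simp [mkSegs]
      | cons u us =>
          have h : mkSegs p L (t :: u :: us) = [p, t] :: [t, u] :: mkSegs u L us := rfl
          rw [h, List.getLast?_cons_cons]
          have h2 : [t, u] :: mkSegs u L us = mkSegs t L (u :: us) := rfl
          rw [h2, ih]
          cases hls : (u :: us).getLast? with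
          | none => simp at hls
          | some x => simp [hls]

theorem mkSegs_snoc (p L t : Int) (ts : List Int) :
    mkSegs p L (ts ++ [t]) = (mkSegs p L ts).dropLast ++ [[ts.getLastD p, t], [t, L]] := by
  induction ts generalizing p with
  | nil => simp [mkSegs]
  | cons u ts ih =>
      simp only [List.cons_append, mkSegs, ih]
      have hne : mkSegs u L ts ≠ [] := by cases ts <;> simp [mkSegs]
      rw [List.dropLast_cons_of_ne_nil hne]
      cases ts <;> simp [List.getLastD]

theorem foldl_upT (L : Int) (ticks : List Int) (n : Nat) :
    (PySem.List.pyRange 0 (n : Int) 1).foldl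
      (fun segs i =>
        if ticks.contains i then
          segs.dropLast ++ [[((segs.getLast?.getD []).headD 0), i], [i, L]]
        else segs)
      [[0, L]] = mkSegs 0 L (upT ticks n) := by
  induction n with
  | zero => simp [upT, mkSegs]
  | succ n ih =>
      have h : ((n : Int) + 1) = ((n + 1 : Nat) : Int) := by push_cast; ring
      rw [← h, PySem.List.pyRange_one_succ_right (by positivity), List.foldl_append, ih,
        upT_succ]
      by_cases hc : ticks.contains ((n : Nat) : Int)
      · simp only [hc, if_true, List.foldl_cons, List.foldl_nil,
          mkSegs_getLast?, Option.getD_some, List.headD_cons]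
        rw [mkSegs_snoc]
      · have hm : ((n : Nat) : Int) ∉ ticks := by simpa [List.contains_iff_mem] using hc
        simp [hm]

theorem mem_upT (ticks : List Int) (n : Nat) (a : Int) :
    a ∈ upT ticks n ↔ a ∈ ticks ∧ 0 ≤ a ∧ a < (n : Int) := by
  simp only [upT, List.mem_filter, List.mem_map, List.mem_range, List.contains_iff_mem]
  constructor
  · rintro ⟨⟨k, hk, rfl⟩, h⟩
    exact ⟨h, by positivity, by exact_mod_cast hk⟩
  · rintro ⟨h, h0, hn⟩
    exact ⟨⟨a.toNat, by omega, by omega⟩, h⟩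

theorem nodup_upT (ticks : List Int) (n : Nat) : (upT ticks n).Nodup := by
  refine List.Nodup.filter _ (List.Nodup.map ?_ (List.nodup_range (n := n)))
  intro a b h
  simpa using h

theorem pairwise_upT (ticks : List Int) (n : Nat) : (upT ticks n).Pairwise (· < ·) := by
  refine List.Pairwise.filter _ (List.Pairwise.map _ ?_ (List.pairwise_lt_range (n := n)))
  intro a b h
  exact_mod_cast h

theorem upT_eq_sorted (L : Int) (ticks : List Int) :
    PySem.List.sorted
      ((PySem.Set.ofList ticks).filter (fun t => decide (0 ≤ t) && decide (t < L)))
      (fun x => x) false = upT ticks L.toNat := by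
  apply PySem.List.sorted_eq_of_perm_of_pairwise_lt
  · rw [List.perm_ext_iff_of_nodup (nodup_upT ticks L.toNat)
      (List.Nodup.filter _ (PySem.Set.nodup_ofList ticks))]
    intro a
    rw [mem_upT]
    simp only [List.mem_filter, PySem.Set.mem_ofList, Bool.and_eq_true, decide_eq_true_eq]
    constructor
    · rintro ⟨h1, h2, h3⟩
      exact ⟨h1, h2, by omega⟩
    · rintro ⟨h1, h2, h3⟩
      exact ⟨h1, h2, by omega⟩
  · exact pairwise_upT ticks L.toNat

-- ===== VERDICT (by name: the statement is the Claim_ definition above) =====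
theorem get_segments_spec : Claim_equal_get_segments := by
  intro L ticks _
  unfold Spec_get_segments get_segments get_segments_alt
  rw [upT_eq_sorted]
  by_cases hL : L ≤ 0
  · rw [PySem.List.pyRange_one_eq_nil hL]
    simp [upT, Int.toNat_of_nonpos hL, mkSegs]
  · have hcast : L = ((L.toNat : Nat) : Int) := by omega
    have h2 := foldl_upT L ticks L.toNat
    rw [← hcast] at h2
    exact h2
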